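-- pv_equiv track=rewrite | github.com/saleh1shalabi/1Dv501-intorduction-to-programing | mini_project/cleaning_words.py | spl
-- ===== SOURCE A (Python) =====
-- def spl(word):
--     "function för att splita orden som sitter ihop, funktionen tar in ett ord och retunerar en lista"
--
--
--     re_word = ""                                                        # ny tom string
--     words = ["iPhone", "iPod","MacBook","iPad","NewYork"]               # undantag
--     x = word[::-1]   # ordet baklänges till vidare behandling
--     if word in words:
--         return [word]                                                   # om ordet är av undantagen retunera ordet som lista
--     elif word.endswith("'s") and x[2:] == x[2:].upper():                # om ordet slutar med ('s) och ordet reversad från 3de bokstaven är stora # retuneras ordet i en lista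
--         return [word]
--     else:
--         if word[0] == word[0].upper() and word[1:] == word[1:].lower():                             # om endast första bokstaven är stor
--
--             return [word]
--
--         elif word.upper() == word or word.lower() == word:                                          # om ordet är stora eller små bokstäver
--
--             return [word]
--
--         else:
--             index = 0                   # en räknare
--
--             for c in word:                  # itterara genom ordet
--                 index +=1
--
--                 if len(word) == index:          # när den är slut
--                     re_word+= c
--                 else:
--                     if c == c.lower() and word[index] == word[index].upper():           # om bokstaven är litet och bokstaven efter är stor gör ett mellanslag i mella
--                         re_word += c + " "
--
--
--                     elif c == c.upper() and word[index] == word[index].lower():         # om bokstaven är stor och bokstaven efter är litet gör ett mellanslag innan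
--
--                         re_word +=  " " + c
--
--
--                     else:
--                         re_word+= c
--
--
--             check = False
--             for c in re_word:               # om nya stringen innehåller mellan slag
--                 if c == " ":
--                     check = True
--                     break
--             if check == True:
--                 return re_word.split()       # retunera en lista av splittad nysträng
--             else:
--                 return [re_word]
-- ===== SOURCE B (Python) =====
-- def spl(word):
--     "split a concatenated word at case-transition boundaries; single pass building segments directly"
--     exceptions = ["iPhone", "iPod", "MacBook", "iPad", "NewYork"]
--     if word in exceptions:
--         return [word]
--     if word.endswith("'s") and word[:-2] == word[:-2].upper():
--         return [word]
--     if word[0] == word[0].upper() and word[1:] == word[1:].lower():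
--         return [word]
--     if word.upper() == word or word.lower() == word:
--         return [word]
--     segments = []
--     buf = ""
--     cs = list(word)
--     n = len(cs)
--     for i in range(n):
--         c = cs[i]
--         if c.isspace():
--             if buf:
--                 segments.append(buf)
--             buf = ""
--         elif i + 1 < n and c == c.lower() and cs[i + 1] == cs[i + 1].upper():
--             buf += c
--             segments.append(buf)
--             buf = ""
--         elif i + 1 < n and c == c.upper() and cs[i + 1] == cs[i + 1].lower():
--             if buf:
--                 segments.append(buf)
--             buf = c
--         else:
--             buf += c
--     if buf:
--         segments.append(buf)
--     return segments
-- ===== Notes on version B (the rewrite author's own statement) =====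
-- stated objective: simpler
-- what changed: A builds a second string with spaces inserted at case-transition boundaries, then scans it for a space and calls split(); B keeps A's early-return guards but replaces that pipeline with a single pass that maintains a current buffer and appends finished segments directly, never materialising the spaced string.
import Mathlib
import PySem

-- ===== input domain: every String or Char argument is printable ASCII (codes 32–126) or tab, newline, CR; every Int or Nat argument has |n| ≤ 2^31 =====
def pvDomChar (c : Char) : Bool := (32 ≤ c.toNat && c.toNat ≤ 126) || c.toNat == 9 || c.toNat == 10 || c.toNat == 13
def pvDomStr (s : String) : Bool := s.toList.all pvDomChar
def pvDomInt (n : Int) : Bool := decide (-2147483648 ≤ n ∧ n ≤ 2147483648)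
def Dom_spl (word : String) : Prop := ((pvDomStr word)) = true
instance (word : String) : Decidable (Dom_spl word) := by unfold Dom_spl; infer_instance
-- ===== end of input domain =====

-- B replaces A's pipeline (build a copy of the word with spaces inserted at case transitions,
-- scan it for a space, then split()) by a single pass that builds the list of segments directly
-- (objective: simpler).


-- ===== PORT A =====
-- c == c.lower() / c == c.upper() on a 1-character Python string, at the char level
def splLowEq (c : Char) : Bool := PySem.Chars.lowerChar c == c
def splUpEq (c : Char) : Bool := PySem.Chars.upperChar c == c

-- the body of A's 'for c in word' loop; state = (index, re_word)
def splStep (w : List Char) (st : Int × List Char) (c : Char) : Int × List Char :=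
  let index := st.1 + 1
  let re := st.2
  if (w.length : Int) == index then (index, re ++ [c])
  else
    -- word[index]: index < len(word) in this branch, so the default is never used
    let nxt := (PySem.List.pyGet? w index).getD ' '
    if splLowEq c && splUpEq nxt then (index, re ++ [c, ' '])
    else if splUpEq c && splLowEq nxt then (index, re ++ [' ', c])
    else (index, re ++ [c])

def spl (word : String) : List String :=
  let words : List String := ["iPhone", "iPod", "MacBook", "iPad", "NewYork"]
  let w := word.toList
  let x := (PySem.Chars.slice? w none none (-1)).getD []        -- x = word[::-1]
  if words.contains word then [word]
  else if PySem.Chars.endswith w ['\'', 's']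
      && (PySem.Chars.slice x (some 2) none == PySem.Chars.upper (PySem.Chars.slice x (some 2) none)) then
    [word]
  else if ((PySem.List.pyGet? w 0).getD ' ' == PySem.Chars.upperChar ((PySem.List.pyGet? w 0).getD ' ')
        -- word[0]: IndexError on the empty string; excluded by Pre_spl
        && (PySem.Chars.slice w (some 1) none == PySem.Chars.lower (PySem.Chars.slice w (some 1) none))) then
    [word]
  else if (PySem.Chars.upper w == w) || (PySem.Chars.lower w == w) then [word]
  else
    let re := (w.foldl (splStep w) (0, [])).2
    let check := re.foldl (fun chk c => if chk then chk else c == ' ') false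
    if check then (PySem.Chars.split₀ re).map String.ofList else [String.ofList re]

-- ===== PORT B =====
-- B's single pass: state = (segments, buf); lookahead = head of the rest of the word
def splAltGo : List Char → List (List Char) → List Char → List (List Char)
  | [], segs, buf => if buf.isEmpty then segs else segs ++ [buf]
  | c :: rest, segs, buf =>
    if PySem.Chars.isspace c then
      splAltGo rest (if buf.isEmpty then segs else segs ++ [buf]) []
    else if (match rest.head? with | some d => splLowEq c && splUpEq d | none => false) then
      splAltGo rest (segs ++ [buf ++ [c]]) []
    else if (match rest.head? with | some d => splUpEq c && splLowEq d | none => false) then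
      splAltGo rest (if buf.isEmpty then segs else segs ++ [buf]) [c]
    else
      splAltGo rest segs (buf ++ [c])

def spl_alt (word : String) : List String :=
  let exceptions : List String := ["iPhone", "iPod", "MacBook", "iPad", "NewYork"]
  let w := word.toList
  if exceptions.contains word then [word]
  else if PySem.Chars.endswith w ['\'', 's']
      && (PySem.Chars.slice w none (some (-2)) == PySem.Chars.upper (PySem.Chars.slice w none (some (-2)))) then
    [word]
  else if ((PySem.List.pyGet? w 0).getD ' ' == PySem.Chars.upperChar ((PySem.List.pyGet? w 0).getD ' ')
        -- word[0]: IndexError on the empty string; excluded by Pre_spl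
        && (PySem.Chars.slice w (some 1) none == PySem.Chars.lower (PySem.Chars.slice w (some 1) none))) then
    [word]
  else if (PySem.Chars.upper w == w) || (PySem.Chars.lower w == w) then [word]
  else (splAltGo w [] []).map String.ofList

-- ===== PRECONDITION & SPEC =====
-- Pre_ excludes only the empty string, on which Python A (and B) raises IndexError at word[0].
def Pre_spl (word : String) : Prop := word ≠ ""
instance (word : String) : Decidable (Pre_spl word) := by unfold Pre_spl; infer_instance
def pvWitness_spl : String := "aXbY"
def Spec_spl (word : String) (out : List String) : Prop := out = spl_alt word
instance (word : String) (out : List String) : Decidable (Spec_spl word out) := by unfold Spec_spl; infer_instance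

-- ===== CLAIM (what is proved, stated in full; the proofs are below) =====
def Claim_equal_spl : Prop := ∀ (word : String), Dom_spl word → Pre_spl word → Spec_spl word (spl word)

-- ===== LEMMAS AND PROOFS =====

-- proof-side characterisation of A's loop: the chars it appends for the adjacent pair (c, d)
def splEmit (c d : Char) : List Char :=
  if splLowEq c && splUpEq d then [c, ' ']
  else if splUpEq c && splLowEq d then [' ', c]
  else [c]

-- A's re_word, as a structural recursion over the word
def splReA : List Char → List Char
  | [] => []
  | [c] => [c]
  | c :: d :: t => splEmit c d ++ splReA (d :: t)

lemma splDom_le (c : Char) (h : pvDomChar c = true) : c.toNat ≤ 126 := by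
  simp [pvDomChar] at h; omega

-- every ASCII char is fixed by lower() or by upper()
lemma splDichotomy (c : Char) (h : pvDomChar c = true) : splLowEq c = true ∨ splUpEq c = true := by
  have aux : ∀ n : Nat, n ≤ 126 →
      (PySem.Chars.lowerChar (Char.ofNat n) == Char.ofNat n
        || (PySem.Chars.upperChar (Char.ofNat n) == Char.ofNat n)) = true := by decide
  have h2 := aux c.toNat (splDom_le c h)
  rw [Char.ofNat_toNat] at h2
  simpa [splLowEq, splUpEq, Bool.or_eq_true] using h2

-- ASCII whitespace is fixed by both lower() and upper()
lemma splWsFix (c : Char) (h : pvDomChar c = true) (hs : PySem.Chars.isspace c = true) :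
    splLowEq c = true ∧ splUpEq c = true := by
  have aux : ∀ n : Nat, n ≤ 126 → PySem.Chars.isspace (Char.ofNat n) = true →
      (PySem.Chars.lowerChar (Char.ofNat n) == Char.ofNat n) = true
        ∧ (PySem.Chars.upperChar (Char.ofNat n) == Char.ofNat n) = true := by decide
  have h2 := aux c.toNat (splDom_le c h)
  rw [Char.ofNat_toNat] at h2
  simpa [splLowEq, splUpEq] using h2 hs

-- A's foldl computes splReA
lemma splFoldl_eq_reA (w : List Char) :
    ∀ (suf pre re : List Char), w = pre ++ suf →
      (suf.foldl (splStep w) ((pre.length : Int), re)).2 = re ++ splReA suf := by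
  intro suf
  induction suf with
  | nil => intro pre re _; simp [splReA]
  | cons c rest ih =>
    intro pre re hw
    rcases rest with _ | ⟨d, t⟩
    · have hlen : w.length = pre.length + 1 := by subst hw; simp
      simp only [List.foldl_cons, List.foldl_nil, splStep, hlen]
      simp [splReA]
    · have hlen : ((w.length : Int) == (pre.length : Int) + 1) = false := by
        subst hw; simp; omega
      have hget : PySem.List.pyGet? w ((pre.length : Int) + 1) = some d := by
        have hw2 : w = (pre ++ [c]) ++ d :: t := by subst hw; simp
        rw [hw2]
        have h3 := PySem.List.pyGet?_append_length (pre := pre ++ [c]) (y := d) (ys := t)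
        simpa using h3
      have key : splStep w ((pre.length : Int), re) c = ((pre.length : Int) + 1, re ++ splEmit c d) := by
        simp only [splStep, splEmit, hlen, hget, Option.getD_some, Bool.false_eq_true, if_false]
        split_ifs <;> rfl
      have hcast : ((pre.length : Int) + 1) = (((pre ++ [c]).length : Nat) : Int) := by simp
      rw [List.foldl_cons, key, hcast, ih (pre ++ [c]) (re ++ splEmit c d) (by subst hw; simp)]
      simp [splReA]

-- the space-check foldl is List.any
lemma splCheck_eq_any (re : List Char) (b : Bool) :
    re.foldl (fun chk c => if chk then chk else c == ' ') b = (b || re.any (· == ' ')) := by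
  induction re generalizing b with
  | nil => simp
  | cons c t ih =>
    simp only [List.foldl_cons, List.any_cons]
    cases b
    · simp [ih]
    · simpa using ih true

-- one-step equations for split₀.go
lemma splGo_nil (cur : List Char) (acc : List (List Char)) :
    PySem.Chars.split₀.go [] cur acc
      = if cur.isEmpty then acc.reverse else (cur.reverse :: acc).reverse := by
  simp only [PySem.Chars.split₀.go]

lemma splGo_ws {a : Char} (r cur : List Char) (acc : List (List Char))
    (ha : PySem.Chars.isspace a = true) :
    PySem.Chars.split₀.go (a :: r) cur acc
      = PySem.Chars.split₀.go r [] (if cur.isEmpty then acc else cur.reverse :: acc) := by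
  by_cases h : cur.isEmpty <;> simp [PySem.Chars.split₀.go, ha, h]

lemma splGo_cons {a : Char} (r cur : List Char) (acc : List (List Char))
    (ha : PySem.Chars.isspace a = false) :
    PySem.Chars.split₀.go (a :: r) cur acc = PySem.Chars.split₀.go r (a :: cur) acc := by
  simp [PySem.Chars.split₀.go, ha]

-- one-step equations for splAltGo (kept as rw lemmas so goals do not unfold recursively)
lemma splAltGo_ws {c : Char} (rest : List Char) (segs : List (List Char)) (buf : List Char)
    (hs : PySem.Chars.isspace c = true) :
    splAltGo (c :: rest) segs buf
      = splAltGo rest (if buf.isEmpty then segs else segs ++ [buf]) [] := by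
  conv_lhs => rw [splAltGo]
  simp only [hs, if_true]

lemma splAltGo_cutA {c d : Char} (t : List Char) (segs : List (List Char)) (buf : List Char)
    (hs : PySem.Chars.isspace c = false) (h1 : (splLowEq c && splUpEq d) = true) :
    splAltGo (c :: d :: t) segs buf = splAltGo (d :: t) (segs ++ [buf ++ [c]]) [] := by
  conv_lhs => rw [splAltGo]
  simp only [hs, List.head?_cons, h1, Bool.false_eq_true, if_false, if_true]

lemma splAltGo_cutB {c d : Char} (t : List Char) (segs : List (List Char)) (buf : List Char)
    (hs : PySem.Chars.isspace c = false) (h1 : (splLowEq c && splUpEq d) = false)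
    (h2 : (splUpEq c && splLowEq d) = true) :
    splAltGo (c :: d :: t) segs buf
      = splAltGo (d :: t) (if buf.isEmpty then segs else segs ++ [buf]) [c] := by
  conv_lhs => rw [splAltGo]
  simp only [hs, List.head?_cons, h1, h2, Bool.false_eq_true, if_false, if_true]

lemma splAltGo_keep {c d : Char} (t : List Char) (segs : List (List Char)) (buf : List Char)
    (hs : PySem.Chars.isspace c = false) (h1 : (splLowEq c && splUpEq d) = false)
    (h2 : (splUpEq c && splLowEq d) = false) :
    splAltGo (c :: d :: t) segs buf = splAltGo (d :: t) segs (buf ++ [c]) := by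
  conv_lhs => rw [splAltGo]
  simp only [hs, List.head?_cons, h1, h2, Bool.false_eq_true, if_false]

lemma splAltGo_last {c : Char} (segs : List (List Char)) (buf : List Char)
    (hs : PySem.Chars.isspace c = false) :
    splAltGo [c] segs buf = splAltGo [] segs (buf ++ [c]) := by
  conv_lhs => rw [splAltGo]
  simp only [hs, List.head?_nil, Bool.false_eq_true, if_false]

lemma splAltGo_nil (segs : List (List Char)) (buf : List Char) :
    splAltGo [] segs buf = if buf.isEmpty then segs else segs ++ [buf] := by
  rw [splAltGo]

-- splAltGo accumulates its segment list on the left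
lemma splAltGo_append (l : List Char) :
    ∀ (segs : List (List Char)) (buf : List Char),
      splAltGo l segs buf = segs ++ splAltGo l [] buf := by
  induction l with
  | nil => intro segs buf; rw [splAltGo_nil, splAltGo_nil]; by_cases h : buf.isEmpty <;> simp [h]
  | cons c rest ih =>
    intro segs buf
    by_cases hs : PySem.Chars.isspace c
    · rw [splAltGo_ws _ _ _ hs, splAltGo_ws _ _ _ hs,
        ih (if buf.isEmpty then segs else segs ++ [buf]) [],
        ih (if buf.isEmpty then [] else [] ++ [buf]) []]
      by_cases hb : buf.isEmpty <;> simp [hb]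
    · have hs' : PySem.Chars.isspace c = false := by simpa using hs
      rcases rest with _ | ⟨d, t⟩
      · rw [splAltGo_last _ _ hs', splAltGo_last _ _ hs', splAltGo_nil, splAltGo_nil]; simp
      · by_cases h1 : splLowEq c && splUpEq d
        · rw [splAltGo_cutA _ _ _ hs' h1, splAltGo_cutA _ _ _ hs' h1,
            ih (segs ++ [buf ++ [c]]) [], ih ([] ++ [buf ++ [c]]) []]
          simp
        · have h1' : (splLowEq c && splUpEq d) = false := by simpa using h1
          by_cases h2 : splUpEq c && splLowEq d
          · rw [splAltGo_cutB _ _ _ hs' h1' h2, splAltGo_cutB _ _ _ hs' h1' h2,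
              ih (if buf.isEmpty then segs else segs ++ [buf]) [c],
              ih (if buf.isEmpty then [] else [] ++ [buf]) [c]]
            by_cases hb : buf.isEmpty <;> simp [hb]
          · have h2' : (splUpEq c && splLowEq d) = false := by simpa using h2
            rw [splAltGo_keep _ _ _ hs' h1' h2', splAltGo_keep _ _ _ hs' h1' h2',
              ih segs (buf ++ [c])]

-- main invariant: whitespace-splitting A's spaced string = B's direct segments
lemma splInv (l : List Char) :
    ∀ (buf : List Char) (acc : List (List Char)),
      (∀ c ∈ buf, PySem.Chars.isspace c = false) →
      (∀ c ∈ l, pvDomChar c = true) →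
      PySem.Chars.split₀.go (splReA l) buf.reverse acc = acc.reverse ++ splAltGo l [] buf := by
  induction l with
  | nil =>
    intro buf acc _ _
    rw [show splReA [] = [] from rfl, splGo_nil, splAltGo_nil]
    by_cases hb : buf.isEmpty
    · have hb' : buf = [] := by simpa [List.isEmpty_iff] using hb
      simp [hb']
    · simp [hb]
  | cons c rest ih =>
    intro buf acc hbuf hdom
    have hcdom : pvDomChar c = true := hdom c (by simp)
    have hbrev : buf.reverse.isEmpty = buf.isEmpty := by simp
    have hsp : PySem.Chars.isspace ' ' = true := by decide
    rcases rest with _ | ⟨d, t⟩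
    · -- single char
      rw [show splReA [c] = [c] from rfl]
      by_cases hs : PySem.Chars.isspace c
      · rw [splGo_ws _ _ _ hs, splGo_nil, splAltGo_ws _ _ _ hs, splAltGo_nil, hbrev]
        by_cases hb : buf.isEmpty
        · have hb' : buf = [] := by simpa [List.isEmpty_iff] using hb
          simp [hb']
        · simp [hb]
      · have hs' : PySem.Chars.isspace c = false := by simpa using hs
        rw [splGo_cons _ _ _ hs', splGo_nil, splAltGo_last _ _ hs', splAltGo_nil]
        simp
    · -- at least two chars
      have hddom : pvDomChar d = true := hdom d (by simp)
      have hrest : ∀ e ∈ (d :: t), pvDomChar e = true := fun e he => hdom e (by simp [he])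
      rw [show splReA (c :: d :: t) = splEmit c d ++ splReA (d :: t) from rfl]
      by_cases hs : PySem.Chars.isspace c
      · -- whitespace char: A emits two whitespace chars, B flushes the buffer
        obtain hcl := (splWsFix c hcdom hs).1
        obtain hcu := (splWsFix c hcdom hs).2
        have hemit : splEmit c d = [c, ' '] ∨ splEmit c d = [' ', c] := by
          rcases splDichotomy d hddom with hdl | hdu
          · by_cases hdu2 : splUpEq d
            · left; simp [splEmit, hcl, hdu2]
            · right; simp [splEmit, hcl, hcu, hdl, hdu2]
          · left; simp [splEmit, hcl, hdu]
        have hgo : PySem.Chars.split₀.go (splEmit c d ++ splReA (d :: t)) buf.reverse acc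
            = PySem.Chars.split₀.go (splReA (d :: t)) ([] : List Char).reverse
                (if buf.isEmpty then acc else buf :: acc) := by
          rcases hemit with he | he <;> rw [he]
          · rw [List.cons_append, List.cons_append, List.nil_append,
               splGo_ws _ _ _ hs, splGo_ws _ _ _ hsp]
            simp [hbrev]
          · rw [List.cons_append, List.cons_append, List.nil_append,
               splGo_ws _ _ _ hsp, splGo_ws _ _ _ hs]
            simp [hbrev]
        rw [hgo, ih [] _ (by simp) hrest, splAltGo_ws _ _ _ hs,
          splAltGo_append _ (if buf.isEmpty then [] else [] ++ [buf]) []]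
        by_cases hb : buf.isEmpty
        · have hb' : buf = [] := by simpa [List.isEmpty_iff] using hb
          simp [hb']
        · simp [hb]
      · -- non-whitespace char
        have hs' : PySem.Chars.isspace c = false := by simpa using hs
        by_cases h1 : splLowEq c && splUpEq d
        · -- cut after c
          rw [show splEmit c d = [c, ' '] by simp [splEmit, h1]]
          rw [List.cons_append, List.cons_append, List.nil_append,
              splGo_cons _ _ _ hs', splGo_ws _ _ _ hsp,
              show (c :: buf.reverse) = (buf ++ [c]).reverse by simp,
              if_neg (by simp)]
          rw [List.reverse_reverse,
            show ((buf ++ [c]) :: acc) = (([buf ++ [c]] : List (List Char)).reverse ++ acc) by simp]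
          rw [show ∀ Y : List (List Char), PySem.Chars.split₀.go (splReA (d :: t)) [] Y
                = PySem.Chars.split₀.go (splReA (d :: t)) ([] : List Char).reverse Y from fun Y => rfl]
          rw [ih [] _ (by simp) hrest, splAltGo_cutA _ _ _ hs' h1,
            splAltGo_append _ ([] ++ [buf ++ [c]]) []]
          simp
        · have h1' : (splLowEq c && splUpEq d) = false := by simpa using h1
          by_cases h2 : splUpEq c && splLowEq d
          · -- cut before c
            rw [show splEmit c d = [' ', c] by simp [splEmit, h1', h2]]
            rw [List.cons_append, List.cons_append, List.nil_append,
                splGo_ws _ _ _ hsp, splGo_cons _ _ _ hs', hbrev,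
                show (c :: ([] : List Char)) = ([c] : List Char).reverse from rfl]
            rw [ih [c] _ (by simpa using hs') hrest, splAltGo_cutB _ _ _ hs' h1' h2,
              splAltGo_append _ (if buf.isEmpty then [] else [] ++ [buf]) [c]]
            by_cases hb : buf.isEmpty
            · have hb' : buf = [] := by simpa [List.isEmpty_iff] using hb
              simp [hb']
            · simp [hb]
          · -- no cut
            have h2' : (splUpEq c && splLowEq d) = false := by simpa using h2
            rw [show splEmit c d = [c] by simp [splEmit, h1', h2']]
            rw [List.cons_append, List.nil_append, splGo_cons _ _ _ hs',
                show (c :: buf.reverse) = (buf ++ [c]).reverse by simp]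
            rw [ih (buf ++ [c]) _ (by
              intro e he
              rcases List.mem_append.mp he with h | h
              · exact hbuf e h
              · simp at h; subst h; exact hs') hrest]
            rw [splAltGo_keep _ _ _ hs' h1' h2']

-- a map that changes the list has a changed element
lemma splMapNe {l : List Char} {f : Char → Char} (h : ¬ l.map f = l) :
    ∃ c ∈ l, (f c == c) = false := by
  by_contra hc
  simp only [not_exists, not_and, Bool.not_eq_false, beq_iff_eq] at hc
  exact h (by calc l.map f = l.map id := List.map_congr_left hc
               _ = l := l.map_id)

-- a word with an upper-case and a lower-case letter gets at least one space inserted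
lemma splSpace (l : List Char) :
    (∀ c ∈ l, pvDomChar c = true) →
    (∃ c ∈ l, splUpEq c = false) → (∃ c ∈ l, splLowEq c = false) →
    ' ' ∈ splReA l := by
  induction l with
  | nil => intro _ h _; simp at h
  | cons c rest ih =>
    intro hdom hup hlow
    have hcdom : pvDomChar c = true := hdom c (by simp)
    have hrest : ∀ e ∈ rest, pvDomChar e = true := fun e he => hdom e (by simp [he])
    rcases rest with _ | ⟨d, t⟩
    · -- singleton: both witnesses are c, contradicting the dichotomy
      obtain ⟨e1, he1, hu⟩ := hup
      obtain ⟨e2, he2, hl⟩ := hlow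
      have hec1 : e1 = c := by simpa using he1
      have hec2 : e2 = c := by simpa using he2
      rw [hec1] at hu; rw [hec2] at hl
      rcases splDichotomy c hcdom with h | h
      · rw [h] at hl; exact absurd hl (by simp)
      · rw [h] at hu; exact absurd hu (by simp)
    · rw [show splReA (c :: d :: t) = splEmit c d ++ splReA (d :: t) from rfl]
      by_cases h1 : splLowEq c && splUpEq d
      · exact List.mem_append.mpr (Or.inl (by simp [splEmit, h1]))
      · by_cases h2 : splUpEq c && splLowEq d
        · exact List.mem_append.mpr (Or.inl (by simp [splEmit, h1, h2]))
        · -- no cut at (c, d): both witnesses survive in d :: t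
          refine List.mem_append.mpr (Or.inr (ih hrest ?_ ?_))
          · obtain ⟨e, he, hu⟩ := hup
            rcases List.mem_cons.mp he with hec | he'
            · -- e = c: upEq c false, so lowEq c true; ¬cutA gives upEq d false
              rw [hec] at hu
              have hcl : splLowEq c = true := by
                rcases splDichotomy c hcdom with h | h
                · exact h
                · rw [h] at hu; exact absurd hu (by simp)
              refine ⟨d, by simp, ?_⟩
              by_contra hdu
              simp only [Bool.not_eq_false] at hdu
              exact h1 (by simp [hcl, hdu])
            · exact ⟨e, he', hu⟩
          · obtain ⟨e, he, hl⟩ := hlow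
            rcases List.mem_cons.mp he with hec | he'
            · rw [hec] at hl
              have hcu : splUpEq c = true := by
                rcases splDichotomy c hcdom with h | h
                · rw [h] at hl; exact absurd hl (by simp)
                · exact h
              refine ⟨d, by simp, ?_⟩
              by_contra hdl
              simp only [Bool.not_eq_false] at hdl
              exact h2 (by simp [hcu, hdl])
            · exact ⟨e, he', hl⟩

-- A's reversed-slice "'s" guard equals B's word[:-2] guard
lemma splGuard2 (w : List Char) :
    (PySem.Chars.slice ((PySem.Chars.slice? w none none (-1)).getD []) (some 2) none
      == PySem.Chars.upper (PySem.Chars.slice ((PySem.Chars.slice? w none none (-1)).getD []) (some 2) none))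
    = (PySem.Chars.slice w none (some (-2))
      == PySem.Chars.upper (PySem.Chars.slice w none (some (-2)))) := by
  have hx : (PySem.Chars.slice? w none none (-1)).getD [] = w.reverse := by
    rw [PySem.Chars.slice?_eq_listSlice?, PySem.List.slice?_none_none_neg_one]; rfl
  have h2 : PySem.Chars.slice w.reverse (some 2) none = w.reverse.drop 2 := by
    rw [show ((2:Int)) = ((2:Nat):Int) from rfl, PySem.Chars.slice_eq_listSlice,
      PySem.List.slice_from_natCast]
  have hm2 : PySem.Chars.slice w none (some (-2)) = w.take (w.length - 2) := by
    rw [PySem.Chars.slice_eq_listSlice, PySem.List.slice_to_neg_ofNat w 2 (by omega)]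
  rw [hx, h2, hm2, List.drop_reverse]
  rw [show PySem.Chars.upper (w.take (w.length - 2)).reverse
        = (PySem.Chars.upper (w.take (w.length - 2))).reverse by
      simp [PySem.Chars.upper]]
  rw [Bool.eq_iff_iff, beq_iff_eq, beq_iff_eq, List.reverse_inj]

-- ===== VERDICT (by name: the statement is the Claim_ definition above) =====
theorem spl_spec : Claim_equal_spl := by
  unfold Claim_equal_spl Spec_spl
  intro word hdom _
  have hchars : ∀ c ∈ word.toList, pvDomChar c = true := by
    simpa [Dom_spl, pvDomStr, List.all_eq_true] using hdom
  simp only [spl, spl_alt, splGuard2]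
  split_ifs with hg1 hg2 hg3 hg4 hchk
  · rfl
  · rfl
  · rfl
  · rfl
  all_goals -- core: no guard fired (two cases: the space check true / false)
    have hupne : ¬ (word.toList.map PySem.Chars.upperChar = word.toList) := by
      intro h
      exact hg4 (Bool.or_eq_true _ _ ▸ Or.inl (beq_iff_eq.mpr
        (show PySem.Chars.upper word.toList = word.toList from h)))
    have hlowne : ¬ (word.toList.map PySem.Chars.lowerChar = word.toList) := by
      intro h
      exact hg4 (Bool.or_eq_true _ _ ▸ Or.inr (beq_iff_eq.mpr
        (show PySem.Chars.lower word.toList = word.toList from h)))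
    have hup : ∃ c ∈ word.toList, splUpEq c = false := by
      obtain ⟨c, hc, h⟩ := splMapNe hupne
      exact ⟨c, hc, by simpa [splUpEq] using h⟩
    have hlow : ∃ c ∈ word.toList, splLowEq c = false := by
      obtain ⟨c, hc, h⟩ := splMapNe hlowne
      exact ⟨c, hc, by simpa [splLowEq] using h⟩
    have hre : (word.toList.foldl (splStep word.toList) (0, [])).2 = splReA word.toList := by
      have h := splFoldl_eq_reA word.toList word.toList [] [] rfl
      simpa using h
    have hsp : ' ' ∈ splReA word.toList := splSpace word.toList hchars hup hlow
    have hany : (splReA word.toList).any (· == ' ') = true :=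
      List.any_eq_true.mpr ⟨' ', hsp, by simp⟩
    first
    | · -- check = true: both sides are the segment list
        have hsplit : PySem.Chars.split₀ (splReA word.toList) = splAltGo word.toList [] [] := by
          have h := splInv word.toList [] [] (by simp) hchars
          simpa [PySem.Chars.split₀] using h
        rw [hre, hsplit]
    | · -- check = false: impossible, a space was inserted
        exfalso
        rw [hre, splCheck_eq_any, Bool.false_or] at hchk
        exact hchk hany
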